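-- pv_equiv track=rewrite | github.com/equinor/neqsim | neqsim-paperlab/tools/book_render_word.py | _split_inline_math
-- ===== SOURCE A (Python) =====
-- def _split_inline_math(text):
--     """Split text into (content, is_math) pairs for inline $...$ math."""
--     result = []
--     pos = 0
--
--     while pos < len(text):
--         idx = text.find("$", pos)
--         if idx == -1:
--             result.append((text[pos:], False))
--             break
--
--         # Skip $$ (display math)
--         if idx + 1 < len(text) and text[idx + 1] == "$":
--             result.append((text[pos:idx + 2], False))
--             pos = idx + 2
--             continue
--
--         # Skip escaped \$
--         if idx > 0 and text[idx - 1] == "\\":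
--             result.append((text[pos:idx + 1], False))
--             pos = idx + 1
--             continue
--
--         if idx > pos:
--             result.append((text[pos:idx], False))
--
--         close = text.find("$", idx + 1)
--         if close == -1:
--             result.append((text[idx:], False))
--             break
--
--         math_content = text[idx + 1:close]
--         if len(math_content) < 200 and "\n" not in math_content:
--             result.append((math_content, True))
--         else:
--             result.append((text[idx:close + 1], False))
--         pos = close + 1
--
--     return result
-- ===== SOURCE B (Python) =====
-- def _split_inline_math(text):
--     """Split text into (content, is_math) pairs for inline $...$ math.
--
--     Splits the text on '$' once and folds over the parts with a pending
--     buffer, instead of repeatedly calling str.find and slicing.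
--     """
--     parts = text.split("$")
--     n = len(parts)
--     result = []
--     buf = parts[0]
--     i = 1  # a '$' sits between buf and parts[i]
--     while i < n:
--         if parts[i] == "" and i + 1 < n:
--             # the '$' is immediately followed by another '$': display math
--             result.append((buf + "$$", False))
--             buf = parts[i + 1]
--             i += 2
--         elif buf.endswith("\\"):
--             # escaped \$ stays with the preceding text
--             result.append((buf + "$", False))
--             buf = parts[i]
--             i += 1
--         elif i < n - 1:
--             # an inline pair $...$ closed by the next '$'
--             if buf:
--                 result.append((buf, False))
--             content = parts[i]
--             if len(content) < 200 and "\n" not in content: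
--                 result.append((content, True))
--             else:
--                 result.append(("$" + content + "$", False))
--             buf = parts[i + 1]
--             i += 2
--         else:
--             # unterminated final '$'
--             if buf:
--                 result.append((buf, False))
--             result.append(("$" + parts[i], False))
--             buf = ""
--             i += 1
--     if buf:
--         result.append((buf, False))
--     return result
-- ===== Notes on version B (the rewrite author's own statement) =====
-- stated objective: alternative
-- what changed: B splits the text on '$' once and folds over the resulting parts with a pending buffer, instead of A's positional scan that repeatedly calls str.find and slices the original string.
import Mathlib
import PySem

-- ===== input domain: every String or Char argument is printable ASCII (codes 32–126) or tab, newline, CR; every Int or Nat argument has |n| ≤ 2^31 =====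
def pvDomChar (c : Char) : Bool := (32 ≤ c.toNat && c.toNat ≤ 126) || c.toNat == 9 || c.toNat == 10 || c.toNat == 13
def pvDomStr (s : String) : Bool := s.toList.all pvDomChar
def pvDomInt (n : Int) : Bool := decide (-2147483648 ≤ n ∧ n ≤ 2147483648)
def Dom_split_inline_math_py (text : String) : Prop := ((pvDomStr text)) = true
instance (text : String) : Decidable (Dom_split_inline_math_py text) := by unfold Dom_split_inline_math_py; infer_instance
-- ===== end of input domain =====

-- B re-implements the splitter by splitting the text on '$' once and folding over the parts
-- with a pending buffer, instead of A's positional scan with repeated str.find and slicing;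
-- same return value, alternative algorithm (no speed claim).

-- ===== PORT A =====
-- the materialized local variables idx / close of A (text.find("$", k) as an index)
def pvIdxA (cs : List Char) (k : Nat) : Nat := (PySem.Chars.findFrom cs ['$'] (k : Int) none).toNat

-- bounds of a successful find, cited by loopA's termination proof
theorem pvFindBounds (cs : List Char) (k : Nat) (hk : k ≤ cs.length)
    (h : PySem.Chars.findFrom cs ['$'] (k : Int) none ≠ -1) :
    k ≤ pvIdxA cs k ∧ pvIdxA cs k < cs.length := by
  obtain ⟨h1, h2, -⟩ := PySem.Chars.findFrom_natCast_spec cs ['$'] k hk h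
  unfold pvIdxA
  refine ⟨by omega, ?_⟩
  by_contra hlen
  rcases h2 with ⟨t, ht⟩
  have : cs.drop (PySem.Chars.findFrom cs ['$'] (k : Int) none).toNat = [] :=
    List.drop_eq_nil_iff.mpr (by omega)
  simp [this] at ht

-- the while-loop of A, on the character list, pos the scan position
def loopA (cs : List Char) (pos : Nat) : List (List Char × Bool) :=
  if hp : pos < cs.length then
    -- idx = text.find("$", pos)
    if hfound : PySem.Chars.findFrom cs ['$'] (pos : Int) none = -1 then
      [(PySem.List.slice cs (some (pos : Int)) none, false)]                      -- text[pos:]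
    else
      if pvIdxA cs pos + 1 < cs.length ∧ cs.getD (pvIdxA cs pos + 1) ' ' = '$' then   -- $$: display math
        (PySem.List.slice cs (some (pos : Int)) (some ((pvIdxA cs pos + 2 : Nat) : Int)), false) ::
          loopA cs (pvIdxA cs pos + 2)
      else if 0 < pvIdxA cs pos ∧ cs.getD (pvIdxA cs pos - 1) ' ' = '\\' then       -- escaped \$
        (PySem.List.slice cs (some (pos : Int)) (some ((pvIdxA cs pos + 1 : Nat) : Int)), false) ::
          loopA cs (pvIdxA cs pos + 1)
      else
        (if pos < pvIdxA cs pos then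
           [(PySem.List.slice cs (some (pos : Int)) (some ((pvIdxA cs pos : Nat) : Int)), false)]
         else []) ++
        -- close = text.find("$", idx + 1)
        if hclose : PySem.Chars.findFrom cs ['$'] ((pvIdxA cs pos + 1 : Nat) : Int) none = -1 then
          [(PySem.List.slice cs (some ((pvIdxA cs pos : Nat) : Int)) none, false)]    -- text[idx:]
        else
          -- math_content = text[idx + 1 : close]
          (if (PySem.List.slice cs (some ((pvIdxA cs pos + 1 : Nat) : Int))
                 (some ((pvIdxA cs (pvIdxA cs pos + 1) : Nat) : Int))).length < 200 ∧
              PySem.Chars.isIn ['\n'] (PySem.List.slice cs (some ((pvIdxA cs pos + 1 : Nat) : Int))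
                 (some ((pvIdxA cs (pvIdxA cs pos + 1) : Nat) : Int))) = false
           then (PySem.List.slice cs (some ((pvIdxA cs pos + 1 : Nat) : Int))
                  (some ((pvIdxA cs (pvIdxA cs pos + 1) : Nat) : Int)), true)
           else (PySem.List.slice cs (some ((pvIdxA cs pos : Nat) : Int))
                  (some ((pvIdxA cs (pvIdxA cs pos + 1) + 1 : Nat) : Int)), false)) ::
            loopA cs (pvIdxA cs (pvIdxA cs pos + 1) + 1)
  else []
termination_by cs.length - pos
decreasing_by
  · have := pvFindBounds cs pos (by omega) hfound; omega
  · have := pvFindBounds cs pos (by omega) hfound; omega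
  · have hb1 := pvFindBounds cs pos (by omega) hfound
    have hb2 := pvFindBounds cs (pvIdxA cs pos + 1) (by omega) hclose
    omega

def split_inline_math_py (text : String) : List (String × Bool) :=
  (loopA text.toList 0).map (fun r => (String.ofList r.1, r.2))

-- ===== PORT B =====
-- the while-loop of B over the split parts: buf is the pending text, rest the parts still ahead
def loopB (buf : List Char) (rest : List (List Char)) : List (List Char × Bool) :=
  match rest with
  | [] => if buf ≠ [] then [(buf, false)] else []                                  -- trailing `if buf`
  | [p] =>                                                                          -- i = n-1: parts[i]=="" and i+1<n is False
      if PySem.Chars.endswith buf ['\\'] then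
        (buf ++ ['$'], false) :: loopB p []
      else
        (if buf ≠ [] then [(buf, false)] else []) ++ (('$' :: p, false) :: loopB [] [])
  | p :: q :: rest'' =>
      if p = [] then                                                                -- '$$'
        (buf ++ ['$', '$'], false) :: loopB q rest''
      else if PySem.Chars.endswith buf ['\\'] then                                  -- escaped \$
        (buf ++ ['$'], false) :: loopB p (q :: rest'')
      else                                                                          -- inline pair
        (if buf ≠ [] then [(buf, false)] else []) ++
        ((if p.length < 200 ∧ PySem.Chars.isIn ['\n'] p = false then (p, true)
          else ('$' :: p ++ ['$'], false)) :: loopB q rest'')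
termination_by rest.length
decreasing_by all_goals simp

def split_inline_math_py_alt (text : String) : List (String × Bool) :=
  match PySem.Chars.splitOn text.toList ['$'] with
  | [] => []                                                                        -- unreachable: split is never empty
  | p0 :: rest => (loopB p0 rest).map (fun r => (String.ofList r.1, r.2))

-- ===== PRECONDITION & SPEC =====
def Spec_split_inline_math_py (text : String) (out : List (String × Bool)) : Prop := out = split_inline_math_py_alt text
instance (text : String) (out : List (String × Bool)) : Decidable (Spec_split_inline_math_py text out) := by unfold Spec_split_inline_math_py; infer_instance

-- ===== CLAIM (what is proved, stated in full; the proofs are below) =====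
def Claim_equal_split_inline_math_py : Prop := ∀ (text : String), Dom_split_inline_math_py text → Spec_split_inline_math_py text (split_inline_math_py text)

-- ===== LEMMAS AND PROOFS =====

-- the '$'-glue of the parts still ahead: each part is preceded by the '$' that split it off
def pvGlue (rest : List (List Char)) : List Char := rest.flatMap (fun p => '$' :: p)

-- a plain structural recursion computing text.split('$') (pre = chars of the current piece)
def pvSplit (pre : List Char) : List Char → List (List Char)
  | [] => [pre]
  | c :: rest => if c = '$' then pre :: pvSplit [] rest else pvSplit (pre ++ [c]) rest

theorem pvSplit_spec (cs : List Char) : ∀ pre, '$' ∉ pre →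
    ∃ b rest, pvSplit pre cs = b :: rest ∧ pre ++ cs = b ++ pvGlue rest ∧
      '$' ∉ b ∧ ∀ p ∈ rest, '$' ∉ p := by
  induction cs with
  | nil =>
    intro pre hpre
    exact ⟨pre, [], rfl, by simp [pvGlue], hpre, by simp⟩
  | cons c rest ih =>
    intro pre hpre
    by_cases hc : c = '$'
    · subst hc
      obtain ⟨b, r, h1, h2, h3, h4⟩ := ih [] (by simp)
      refine ⟨pre, b :: r, by simp [pvSplit, h1], ?_, hpre, ?_⟩
      · simp only [List.nil_append] at h2
        rw [pvGlue, List.flatMap_cons, ← pvGlue, h2]; simp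
      · intro p hp
        rcases List.mem_cons.mp hp with rfl | hm
        · exact h3
        · exact h4 p hm
    · obtain ⟨b, r, h1, h2, h3, h4⟩ := ih (pre ++ [c]) (by simp [hpre, Ne.symm hc])
      refine ⟨b, r, by simp [pvSplit, hc, h1], by simpa using h2, h3, h4⟩

theorem pvGo_eq : ∀ (fuel : Nat) (l cur acc : _), l.length < fuel →
    PySem.Chars.splitOn.go ['$'] fuel l cur acc = acc.reverse ++ pvSplit cur.reverse l := by
  intro fuel
  induction fuel with
  | zero => intro l cur acc h; omega
  | succ n ih =>
    intro l cur acc h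
    cases l with
    | nil => simp [PySem.Chars.splitOn.go, pvSplit]
    | cons c rest =>
      by_cases hc : c = '$'
      · subst hc
        rw [PySem.Chars.splitOn.go]
        simp only [List.isPrefixOf, beq_self_eq_true, Bool.true_and, if_pos]
        rw [show List.drop ['$'].length ('$' :: rest) = rest from rfl]
        rw [ih rest [] (cur.reverse :: acc) (by simpa using h)]
        simp [pvSplit]
      · rw [PySem.Chars.splitOn.go]
        have hb : (['$'].isPrefixOf (c :: rest)) = false := by
          simp [List.isPrefixOf, Ne.symm hc]
        rw [if_neg (by simp [hb])]
        rw [ih rest (c :: cur) acc (by simpa using h)]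
        simp [pvSplit, hc]

theorem pvSplitOn_eq (cs : List Char) : PySem.Chars.splitOn cs ['$'] = pvSplit [] cs := by
  rw [PySem.Chars.splitOn, pvGo_eq (cs.length + 1) cs [] [] (by omega)]
  simp

theorem pvPrefixSingleton (c : Char) (l : List Char) : [c] <+: l ↔ l[0]? = some c := by
  cases l with
  | nil => simp
  | cons a t => simp [List.cons_prefix_cons, eq_comm]

theorem pvFindNone (ys : List Char) (h : '$' ∉ ys) :
    PySem.Chars.find ys ['$'] = -1 := by
  rw [PySem.Chars.find_eq_neg_one_iff, List.singleton_infix_iff]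
  exact h

theorem pvFindChar (ys zs : List Char) (h : '$' ∉ ys) :
    PySem.Chars.find (ys ++ '$' :: zs) ['$'] = (ys.length : Int) := by
  set s := ys ++ '$' :: zs with hs
  have hne : PySem.Chars.find s ['$'] ≠ -1 := by
    rw [PySem.Chars.find_ne_neg_one_iff, List.singleton_infix_iff]; simp [hs]
  have h0 : 0 ≤ PySem.Chars.find s ['$'] := by
    have := PySem.Chars.neg_one_le_find (s := s) (sub := ['$'])
    omega
  obtain ⟨hpre, hmin⟩ := PySem.Chars.find_spec h0
  set F := (PySem.Chars.find s ['$']).toNat with hF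
  have hat : s[F]? = some '$' := by
    have h1 : (s.drop F)[0]? = some '$' := (pvPrefixSingleton _ _).mp hpre
    simpa [List.getElem?_drop] using h1
  have hub : ¬ ys.length < F := by
    intro hlt
    exact hmin ys.length hlt (by rw [hs, List.drop_left]; exact ⟨zs, rfl⟩)
  have hlb : ¬ F < ys.length := by
    intro hlt
    apply h
    have : ys[F]? = some '$' := by
      rw [← hat, hs, List.getElem?_append_left hlt]
    exact List.mem_of_getElem? this
  omega

theorem pvEndsSingleton (l : List Char) (c : Char) :
    PySem.Chars.endswith l [c] = true ↔ ∃ ys, l = ys ++ [c] := by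
  rw [PySem.Chars.endswith_iff]
  constructor
  · rintro ⟨t, ht⟩; exact ⟨t, ht.symm⟩
  · rintro ⟨ys, rfl⟩; exact ⟨ys, rfl⟩

theorem pvEndsConcat (ys : List Char) (c d : Char) :
    PySem.Chars.endswith (ys ++ [c]) [d] = true ↔ c = d := by
  rw [pvEndsSingleton]
  constructor
  · rintro ⟨zs, hz⟩
    exact (List.singleton_injective ((List.append_inj' hz rfl).2)).symm ▸ rfl
  · rintro rfl; exact ⟨ys, rfl⟩

-- the terminal case: no '$' ahead of pos
theorem pvNil (cs buf : List Char) (pos : Nat) (h1 : cs.drop pos = buf) (h2 : '$' ∉ buf) :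
    loopA cs pos = loopB buf [] := by
  by_cases hb : buf = []
  · subst hb
    have hlen : cs.length ≤ pos := List.drop_eq_nil_iff.mp h1
    rw [loopA, dif_neg (by omega)]
    simp [loopB]
  · have hpos : pos < cs.length := by
      by_contra hcon
      exact hb ((List.drop_eq_nil_iff.mpr (by omega)).symm.trans h1).symm
    have hfind : PySem.Chars.findFrom cs ['$'] (pos : Int) none = -1 := by
      rw [PySem.Chars.findFrom_natCast cs ['$'] pos hpos.le, h1, pvFindNone buf h2]
      simp
    rw [loopA, dif_pos hpos, dif_pos hfind]
    rw [PySem.List.slice_from_natCast, h1]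
    simp [loopB, hb]

theorem pvMain (cs : List Char) : ∀ (n : Nat) (rest : List (List Char)), rest.length ≤ n →
    ∀ (buf : List Char) (pos : Nat),
    cs.drop pos = buf ++ pvGlue rest → '$' ∉ buf → (∀ p ∈ rest, '$' ∉ p) →
    (0 < pos → cs[pos - 1]? = some '$') →
    loopA cs pos = loopB buf rest := by
  intro n
  induction n with
  | zero =>
    intro rest hlen buf pos h1 h2 h3 h4
    have : rest = [] := List.length_eq_zero_iff.mp (by omega)
    subst this
    exact pvNil cs buf pos (by simpa [pvGlue] using h1) h2
  | succ n ihn =>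
    intro rest hlen buf pos h1 h2 h3 h4
    cases rest with
    | nil => exact pvNil cs buf pos (by simpa [pvGlue] using h1) h2
    | cons p rest' =>
      have hpmem : '$' ∉ p := h3 p (by simp)
      rw [show pvGlue (p :: rest') = '$' :: (p ++ pvGlue rest') by simp [pvGlue]] at h1
      have hpos : pos < cs.length := by
        by_contra hcon
        have := (List.drop_eq_nil_iff.mpr (by omega : cs.length ≤ pos)).symm.trans h1
        simp at this
      have hfind : PySem.Chars.findFrom cs ['$'] (pos : Int) none = (pos : Int) + buf.length := by
        rw [PySem.Chars.findFrom_natCast cs ['$'] pos hpos.le, h1, pvFindChar buf _ h2]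
        rw [if_neg (by omega)]
      have hne : PySem.Chars.findFrom cs ['$'] (pos : Int) none ≠ -1 := by rw [hfind]; omega
      have hidx : pvIdxA cs pos = pos + buf.length := by rw [pvIdxA, hfind]; omega
      have hdropidx : cs.drop (pos + buf.length) = '$' :: (p ++ pvGlue rest') := by
        rw [← List.drop_drop, h1, List.drop_left]
      have hgetidx : cs[pos + buf.length]? = some '$' := by
        have := congrArg (fun l => l[0]?) hdropidx
        simpa [List.getElem?_drop] using this
      have hget1 : cs[pos + buf.length + 1]? = (p ++ pvGlue rest')[0]? := by
        have := congrArg (fun l => l[1]?) hdropidx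
        simpa [List.getElem?_drop] using this
      have hidxlt : pos + buf.length < cs.length := (List.getElem?_eq_some_iff.mp hgetidx).1
      rw [loopA, dif_pos hpos, dif_neg hne]
      by_cases hdd : p = [] ∧ rest' ≠ []
      · -- '$$' display-math branch on both sides
        obtain ⟨hp0, hr⟩ := hdd
        subst hp0
        obtain ⟨q, rest'', rfl⟩ : ∃ q rest'', rest' = q :: rest'' := by
          cases rest' with
          | nil => exact absurd rfl hr
          | cons q r => exact ⟨q, r, rfl⟩
        have hget1' : cs[pos + buf.length + 1]? = some '$' := by
          rw [hget1]; simp [pvGlue]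
        have hC1 : pvIdxA cs pos + 1 < cs.length ∧ cs.getD (pvIdxA cs pos + 1) ' ' = '$' := by
          rw [hidx]
          refine ⟨(List.getElem?_eq_some_iff.mp hget1').1, ?_⟩
          rw [List.getD_eq_getElem?_getD, hget1']
          rfl
        rw [if_pos hC1]
        rw [loopB, if_pos rfl]
        congr 1
        · -- emitted segment: text[pos:idx+2] = buf ++ "$$"
          rw [hidx, PySem.List.slice_natCast, h1,
              show pos + buf.length + 2 - pos = buf.length + 2 from by omega,
              List.take_length_add_append]
          simp [pvGlue]
        · -- recurse
          apply ihn rest'' (by simp at hlen ⊢; omega) q (pvIdxA cs pos + 2)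
          · rw [hidx, ← List.drop_drop, hdropidx]
            simp [pvGlue]
          · exact h3 q (by simp)
          · intro r hr'; exact h3 r (by simp [hr'])
          · intro _
            rw [hidx, show pos + buf.length + 2 - 1 = pos + buf.length + 1 by omega]
            exact hget1'
      · -- not display math: idx's successor is not '$'
        have hC1f : ¬ (pvIdxA cs pos + 1 < cs.length ∧ cs.getD (pvIdxA cs pos + 1) ' ' = '$') := by
          rw [hidx]
          rintro ⟨hlt, hgd⟩
          rw [List.getD_eq_getElem?_getD, hget1] at hgd
          cases p with
          | cons c p' =>
            simp at hgd
            exact hpmem (by simp [hgd])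
          | nil =>
            have hr : rest' = [] := by
              by_contra hr
              exact hdd ⟨rfl, hr⟩
            subst hr
            simp [pvGlue] at hgd
        rw [if_neg hC1f]
        -- escape analysis
        have hesciff : PySem.Chars.endswith buf ['\\'] = true ↔
            (0 < pvIdxA cs pos ∧ cs.getD (pvIdxA cs pos - 1) ' ' = '\\') := by
          rw [hidx]
          rcases List.eq_nil_or_concat buf with rfl | ⟨ys, c, rfl⟩
          · constructor
            · intro hco; exact absurd hco (by decide)
            · rintro ⟨hlt, hgd⟩
              exfalso
              simp only [List.length_nil, Nat.add_zero] at hlt hgd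
              rw [List.getD_eq_getElem?_getD, h4 hlt] at hgd
              simp at hgd
          · simp only [List.concat_eq_append] at *
            have hgetc : cs[pos + (ys ++ [c]).length - 1]? = some c := by
              have h0 : (cs.drop pos)[ys.length]? = some c := by
                rw [h1, List.getElem?_append_left (by simp)]
                simp
              rw [List.getElem?_drop] at h0
              simp only [List.length_append, List.length_cons, List.length_nil]
              rw [show pos + (ys.length + (0 + 1)) - 1 = pos + ys.length from by omega]
              exact h0
            rw [pvEndsConcat]
            constructor
            · rintro rfl
              refine ⟨by simp, ?_⟩
              rw [List.getD_eq_getElem?_getD,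
                  show pos + (ys ++ ['\\']).length - 1 = pos + (ys ++ ['\\']).length - 1 from rfl,
                  hgetc]
              rfl
            · rintro ⟨hlt, hgd⟩
              rw [List.getD_eq_getElem?_getD, hgetc] at hgd
              exact hgd
        have hendst := hesciff.mp
        have hendsf : PySem.Chars.endswith buf ['\\'] = false →
            ¬ (0 < pvIdxA cs pos ∧ cs.getD (pvIdxA cs pos - 1) ' ' = '\\') := by
          intro hco hc2
          rw [hesciff.mpr hc2] at hco
          cases hco
        by_cases hesc : PySem.Chars.endswith buf ['\\'] = true
        · -- escaped \$ branch on both sides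
          rw [if_pos (hendst hesc)]
          have hrec : loopA cs (pvIdxA cs pos + 1) = loopB p rest' := by
            apply ihn rest' (by simp at hlen ⊢; omega) p (pvIdxA cs pos + 1)
            · rw [hidx, ← List.drop_drop, hdropidx]
              simp
            · exact hpmem
            · intro r hr'; exact h3 r (by simp [hr'])
            · intro _
              rw [hidx, show pos + buf.length + 1 - 1 = pos + buf.length by omega]
              exact hgetidx
          have hseg : PySem.List.slice cs (some (pos : Int)) (some ((pvIdxA cs pos + 1 : Nat) : Int)) = buf ++ ['$'] := by
            rw [hidx, PySem.List.slice_natCast, h1,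
                show pos + buf.length + 1 - pos = buf.length + 1 from by omega,
                List.take_length_add_append]
            simp
          cases rest' with
          | nil => rw [loopB, if_pos hesc, hseg, hrec]
          | cons q rest'' =>
            rw [loopB, if_neg (show ¬ p = [] from fun hp0 => hdd ⟨hp0, by simp⟩), if_pos hesc, hseg, hrec]
        · -- inline-math / unterminated branch on both sides
          have hescf : PySem.Chars.endswith buf ['\\'] = false := by
            simpa using hesc
          rw [if_neg (hendsf hescf)]
          have hpre : (if pos < pvIdxA cs pos then
              [(PySem.List.slice cs (some (pos : Int)) (some ((pvIdxA cs pos : Nat) : Int)), false)] else []) =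
              (if buf ≠ [] then [(buf, false)] else []) := by
            rw [hidx]
            by_cases hb : buf = []
            · subst hb; simp
            · have hlp : 0 < buf.length := by
                cases buf
                · exact absurd rfl hb
                · simp
              rw [if_pos (by omega), if_pos hb, PySem.List.slice_natCast,
                  show pos + buf.length - pos = buf.length from by omega, h1, List.take_left]
          have hidxle : pvIdxA cs pos + 1 ≤ cs.length := by omega
          cases rest' with
          | nil =>
            -- unterminated: close == -1
            have hdrop1 : cs.drop (pos + buf.length + 1) = p := by
              rw [← List.drop_drop, hdropidx]
              simp [pvGlue]
            have hclose : PySem.Chars.findFrom cs ['$'] ((pvIdxA cs pos + 1 : Nat) : Int) none = -1 := by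
              rw [hidx, PySem.Chars.findFrom_natCast cs ['$'] _ (by omega), hdrop1, pvFindNone p hpmem]
              simp
            rw [dif_pos hclose]
            rw [loopB, if_neg hesc, hpre]
            congr 2
            -- text[idx:] = '$' :: p, and loopB [] [] = []
            · rw [hidx, PySem.List.slice_from_natCast, hdropidx]
              simp [pvGlue]
            · simp [loopB]
          | cons q rest'' =>
            have hdrop1 : cs.drop (pos + buf.length + 1) = p ++ '$' :: (q ++ pvGlue rest'') := by
              rw [← List.drop_drop, hdropidx]
              simp [pvGlue]
            have hclosefind : PySem.Chars.findFrom cs ['$'] ((pvIdxA cs pos + 1 : Nat) : Int) none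
                = ((pos + buf.length + 1 + p.length : Nat) : Int) := by
              rw [hidx, PySem.Chars.findFrom_natCast cs ['$'] _ (by omega), hdrop1, pvFindChar p _ hpmem]
              rw [if_neg (by omega)]
              push_cast
              ring
            have hclosene : PySem.Chars.findFrom cs ['$'] ((pvIdxA cs pos + 1 : Nat) : Int) none ≠ -1 := by
              rw [hclosefind]; omega
            rw [dif_neg hclosene]
            have hcloseval : pvIdxA cs (pvIdxA cs pos + 1) = pos + buf.length + 1 + p.length := by
              rw [show pvIdxA cs (pvIdxA cs pos + 1)
                    = (PySem.Chars.findFrom cs ['$'] ((pvIdxA cs pos + 1 : Nat) : Int) none).toNat from rfl,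
                  hclosefind]
              omega
            have hcontent : PySem.List.slice cs (some ((pvIdxA cs pos + 1 : Nat) : Int))
                (some ((pvIdxA cs (pvIdxA cs pos + 1) : Nat) : Int)) = p := by
              rw [hcloseval, hidx, PySem.List.slice_natCast,
                  show pos + buf.length + 1 + p.length - (pos + buf.length + 1) = p.length from by omega,
                  hdrop1, List.take_left]
            rw [loopB, if_neg (show ¬ p = [] from fun hp0 => hdd ⟨hp0, by simp⟩), if_neg hesc, hpre]
            congr 1
            congr 1
            · -- the emitted math / fallback segment
              rw [hcontent]
              by_cases hcond : p.length < 200 ∧ PySem.Chars.isIn ['\n'] p = false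
              · rw [if_pos hcond, if_pos hcond]
              · rw [if_neg hcond, if_neg hcond]
                congr 1
                rw [hcloseval, hidx, PySem.List.slice_natCast,
                    show pos + buf.length + 1 + p.length + 1 - (pos + buf.length) = p.length + 2 from by omega,
                    hdropidx,
                    show pvGlue (q :: rest'') = '$' :: (q ++ pvGlue rest'') from by simp [pvGlue],
                    show p.length + 2 = (p.length + 1) + 1 from rfl,
                    List.take_succ_cons, List.take_length_add_append]
                simp
            · -- recurse
              rw [hcloseval]
              apply ihn rest'' (by simp at hlen ⊢; omega) q (pos + buf.length + 1 + p.length + 1)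
              · rw [← List.drop_drop, ← List.drop_drop, hdrop1, List.drop_left]
                simp
              · exact h3 q (by simp)
              · intro r hr'; exact h3 r (by simp [hr'])
              · intro _
                have hd : cs.drop (pos + buf.length + 1 + p.length) = '$' :: (q ++ pvGlue rest'') := by
                  rw [← List.drop_drop, hdrop1, List.drop_left]
                rw [show pos + buf.length + 1 + p.length + 1 - 1 = pos + buf.length + 1 + p.length from by omega]
                have h0 := congrArg (fun l => l[0]?) hd
                simpa [List.getElem?_drop] using h0


-- ===== VERDICT (by name: the statement is the Claim_ definition above) =====
theorem split_inline_math_py_spec : Claim_equal_split_inline_math_py := by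
  intro text _
  unfold Spec_split_inline_math_py split_inline_math_py split_inline_math_py_alt
  rw [pvSplitOn_eq]
  obtain ⟨b, rest, hsp, hglue, hb, hrest⟩ := pvSplit_spec text.toList [] (by simp)
  rw [hsp]
  rw [pvMain text.toList rest.length rest le_rfl b 0 (by simpa using hglue) hb hrest (by omega)]
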